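-- pv_equiv track=rewrite | github.com/atucker/bril | compiler/dominators.py | dominance_tree
-- ===== SOURCE A (Python) =====
-- def dominance_tree(dom):
--     tree = {}
--     # Put the entry points in place
--     for node, dominated_by in dom.items():
--         if dominated_by == {node}:
--             tree[node] = set()
--
--     changed = True
--     while changed:
--         changed = False
--         for pred, ancestors in dom.items():
--             for node, dominated_by in dom.items():
--                 # If you find a node which is dominated by your ancestors +
--                 # itself, then you've found an immediate successor
--                 if node != pred and dominated_by == {node} | ancestors:
--                     if node not in tree[pred]:
--                         tree[pred] = tree[pred] | {node}
--                         changed = True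
--                     if node not in tree:
--                         tree[node] = set()
--                         changed = True
--     return tree
-- ===== SOURCE B (Python) =====
-- def dominance_tree(dom):
--     # Index nodes by their (frozen) dominator set once; a node's possible parents
--     # are the nodes whose dominator set equals dom[n] or dom[n]-{n}, found by two
--     # O(1) lookups instead of comparing set unions for every (pred, node) pair,
--     # and the tree is then built in one guarded sweep instead of a fixpoint loop.
--     index = {}
--     for p, s in dom.items():
--         index.setdefault(frozenset(s), []).append(p)
--     children = {p: [] for p in dom}
--     for n, s in dom.items():
--         if n in s:
--             fs = frozenset(s)
--             for p in index.get(fs, []) + index.get(fs - {n}, []):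
--                 if p != n:
--                     children[p].append(n)
--     tree = {}
--     for n, s in dom.items():
--         if s == {n}:
--             tree[n] = set()
--     for p in dom:
--         if p in tree:
--             for n in children[p]:
--                 tree[p].add(n)
--                 if n not in tree:
--                     tree[n] = set()
--     return tree
-- ===== Notes on version B (the rewrite author's own statement) =====
-- stated objective: faster
-- what changed: A repeatedly sweeps all (pred, node) pairs until a fixpoint, recomputing a set union and set comparison for each pair in every pass; B builds a frozenset-keyed index of the dominator sets once, finds each node's parents by two lookups (dom[n] and dom[n]-{n}), and assembles the tree in a single guarded sweep with no fixpoint loop.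
import Mathlib
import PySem

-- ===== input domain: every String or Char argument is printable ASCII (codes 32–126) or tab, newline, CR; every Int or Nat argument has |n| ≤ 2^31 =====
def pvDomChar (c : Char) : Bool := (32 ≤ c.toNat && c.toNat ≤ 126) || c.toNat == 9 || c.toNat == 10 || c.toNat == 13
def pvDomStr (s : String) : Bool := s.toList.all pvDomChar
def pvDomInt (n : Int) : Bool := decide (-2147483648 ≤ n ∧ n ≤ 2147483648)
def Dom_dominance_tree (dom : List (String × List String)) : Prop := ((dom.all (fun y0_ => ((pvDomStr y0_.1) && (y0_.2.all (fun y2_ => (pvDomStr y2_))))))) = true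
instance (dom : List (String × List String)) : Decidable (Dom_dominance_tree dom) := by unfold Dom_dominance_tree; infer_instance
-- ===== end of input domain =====

-- B replaces A's O(n^2)-pairs-per-pass fixpoint loop (set union + comparison for every
-- (pred, node) pair, repeated until stable) by a frozenset-keyed index of the dominator
-- sets, from which each node's parents are found by two lookups, and one guarded sweep.

-- ===== PORT A =====
-- A-side: body of the innermost 'if node != pred and dominated_by == {node} | ancestors' step
def pvStepA (pa : String × List String)
    (st : PySem.Dict String (List String) × Bool) (nb : String × List String) :
    PySem.Dict String (List String) × Bool :=
  if nb.1 ≠ pa.1 ∧ PySem.Set.equal nb.2 (PySem.Set.union [nb.1] pa.2) = true then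
    let st1 := if PySem.Set.contains (st.1.getD pa.1 []) nb.1 = true then st
               else (st.1.insert pa.1 (PySem.Set.union (st.1.getD pa.1 []) [nb.1]), true)
    if st1.1.contains nb.1 = true then st1 else (st1.1.insert nb.1 [], true)
  else st

-- A-side: one sweep of the while-loop body ('for pred … for node …'), returns (tree, changed)
def pvPassA (items : List (String × List String))
    (t0 : PySem.Dict String (List String)) : PySem.Dict String (List String) × Bool :=
  items.foldl (fun st pa => items.foldl (pvStepA pa) st) (t0, false)

-- A-side: the 'while changed' loop; fuel bounds the number of passes (each pass that
-- continues has strictly grown the tree, so the quadratic fuel is never exhausted)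
def pvLoopA (items : List (String × List String)) :
    Nat → PySem.Dict String (List String) → PySem.Dict String (List String)
  | 0, t => t
  | fuel+1, t =>
    let st := pvPassA items t
    if st.2 then pvLoopA items fuel st.1 else st.1

def dominance_tree (dom : List (String × List String)) : List (String × List String) :=
  let items := (PySem.Dict.ofList dom).items
  let tree := items.foldl (fun tr nb =>
      if PySem.Set.equal nb.2 [nb.1] = true then tr.insert nb.1 [] else tr) PySem.Dict.empty
  (pvLoopA items (items.length * items.length + items.length + 1) tree).items

-- ===== PORT B =====
-- B-side: the dict keyed by frozensets, modelled as an assoc list looked up by set equality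
-- (a hash lookup hits exactly the bucket whose frozenset key is set-equal; exact)
def pvFsGet (idx : List (List String × List String)) (k : List String) : List String :=
  match idx with
  | [] => []
  | b :: rest => if PySem.Set.equal b.1 k = true then b.2 else pvFsGet rest k

-- B-side: index.setdefault(frozenset(s), []).append(p)
def pvFsApp (idx : List (List String × List String)) (k : List String) (p : String) :
    List (List String × List String) :=
  match idx with
  | [] => [(k, [p])]
  | b :: rest => if PySem.Set.equal b.1 k = true then (b.1, b.2 ++ [p]) :: rest
                 else b :: pvFsApp rest k p

-- B-side: 'tree[p].add(n); if n not in tree: tree[n] = set()'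
def pvInnerB (p : String) (t : PySem.Dict String (List String)) (n : String) :
    PySem.Dict String (List String) :=
  let t1 := t.insert p (PySem.Set.add (t.getD p []) n)
  if t1.contains n = true then t1 else t1.insert n []

-- B-side: 'if p in tree: for n in children[p]: …'
def pvStepB (children : PySem.Dict String (List String))
    (t : PySem.Dict String (List String)) (pa : String × List String) :
    PySem.Dict String (List String) :=
  if t.contains pa.1 = true then (children.getD pa.1 []).foldl (pvInnerB pa.1) t else t

def dominance_tree_alt (dom : List (String × List String)) : List (String × List String) :=
  let items := (PySem.Dict.ofList dom).items
  let index := items.foldl (fun idx pa => pvFsApp idx pa.2 pa.1) []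
  let children0 := items.foldl (fun ch pa => ch.insert pa.1 ([] : List String)) PySem.Dict.empty
  let children := items.foldl (fun ch nb =>
      if PySem.Set.contains nb.2 nb.1 = true then
        (((pvFsGet index (PySem.Set.ofList nb.2) ++
           pvFsGet index (PySem.Set.diff (PySem.Set.ofList nb.2) [nb.1])).filter
            (fun p => p ≠ nb.1)).foldl (fun ch p => ch.modify p [] (· ++ [nb.1])) ch)
      else ch) children0
  let tree0 := items.foldl (fun tr nb =>
      if PySem.Set.equal nb.2 [nb.1] = true then tr.insert nb.1 [] else tr) PySem.Dict.empty
  (items.foldl (pvStepB children) tree0).items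

-- ===== PRECONDITION & SPEC =====
-- the immediate-dominance edge test A applies to every (pred, node) pair
def pvEdge (p : String) (sp : List String) (nb : String × List String) : Bool :=
  decide (nb.1 ≠ p) && PySem.Set.equal nb.2 (PySem.Set.union [nb.1] sp)

-- one sweep step: grow the reachable-key set at an already-keyed pred, and record
-- failure when an unkeyed pred has an immediate-dominance child
def pvSweepF (items : List (String × List String)) (acc : List String × Bool)
    (pa : String × List String) : List String × Bool :=
  let ch := items.filter (pvEdge pa.1 pa.2)
  if PySem.Set.contains acc.1 pa.1 = true then
    (PySem.Set.update acc.1 (ch.map (·.1)), acc.2)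
  else (acc.1, acc.2 && ch.isEmpty)

-- the self-dominated roots, the keys A's first loop puts in the tree
def pvRoots (items : List (String × List String)) : List String :=
  items.foldl (fun r nb =>
    if PySem.Set.equal nb.2 [nb.1] = true then PySem.Set.add r nb.1 else r) []

-- Pre_ excludes exactly the inputs on which Python A raises KeyError (tree[pred] read for a
-- pred not yet in the tree): every node with an immediate-dominance child must be reachable
-- from a self-dominated root along edges whose sources occur in increasing dict order.
def Pre_dominance_tree (dom : List (String × List String)) : Prop :=
  (((PySem.Dict.ofList dom).items.foldl (pvSweepF (PySem.Dict.ofList dom).items)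
      (pvRoots (PySem.Dict.ofList dom).items, true)).2) = true

instance (dom : List (String × List String)) : Decidable (Pre_dominance_tree dom) := by
  unfold Pre_dominance_tree; infer_instance

def pvWitness_dominance_tree : (List (String × List String)) :=
  [("a", ["a"]), ("b", ["a", "b"]), ("c", ["a", "b", "c"])]

def Spec_dominance_tree (dom : List (String × List String)) (out : List (String × List String)) : Prop := out = dominance_tree_alt dom
instance (dom : List (String × List String)) (out : List (String × List String)) : Decidable (Spec_dominance_tree dom out) := by unfold Spec_dominance_tree; infer_instance

-- ===== CLAIM (what is proved, stated in full; the proofs are below) =====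
def Claim_equal_dominance_tree : Prop := ∀ (dom : List (String × List String)), Dom_dominance_tree dom → Pre_dominance_tree dom → Spec_dominance_tree dom (dominance_tree dom)

-- ===== LEMMAS AND PROOFS =====

theorem pv_equal_symm {a b : List String} (h : PySem.Set.equal a b = true) :
    PySem.Set.equal b a = true := by
  rw [PySem.Set.equal_iff] at *; intro x; exact (h x).symm

theorem pv_equal_trans {a b c : List String} (h₁ : PySem.Set.equal a b = true)
    (h₂ : PySem.Set.equal b c = true) : PySem.Set.equal a c = true := by
  rw [PySem.Set.equal_iff] at *; intro x; exact (h₁ x).trans (h₂ x)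

theorem pv_fsGet_fsApp (idx : List (List String × List String)) (k K : List String) (p : String) :
    pvFsGet (pvFsApp idx K p) k =
      pvFsGet idx k ++ (if PySem.Set.equal K k = true then [p] else []) := by
  induction idx with
  | nil =>
    by_cases h : PySem.Set.equal K k = true
    · simp only [pvFsApp, pvFsGet, if_pos h, List.nil_append]
    · simp only [pvFsApp, pvFsGet, if_neg h, List.nil_append]
  | cons b rest ih =>
    by_cases hb : PySem.Set.equal b.1 K = true
    · by_cases hbk : PySem.Set.equal b.1 k = true
      · have hKk : PySem.Set.equal K k = true := pv_equal_trans (pv_equal_symm hb) hbk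
        simp only [pvFsApp, if_pos hb, pvFsGet, if_pos hbk, if_pos hKk]
      · have hKk : ¬ PySem.Set.equal K k = true := fun h => hbk (pv_equal_trans hb h)
        simp only [pvFsApp, if_pos hb, pvFsGet, if_neg hbk, if_neg hKk, List.append_nil]
    · by_cases hbk : PySem.Set.equal b.1 k = true
      · have hKk : ¬ PySem.Set.equal K k = true := fun h =>
          hb (pv_equal_trans hbk (pv_equal_symm h))
        simp only [pvFsApp, if_neg hb, pvFsGet, if_pos hbk, if_neg hKk, List.append_nil]
      · simp only [pvFsApp, if_neg hb, pvFsGet, if_neg hbk, ih]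

theorem pv_fsGet_index (L : List (String × List String))
    (idx0 : List (List String × List String)) (k : List String) :
    pvFsGet (L.foldl (fun idx pa => pvFsApp idx pa.2 pa.1) idx0) k =
      pvFsGet idx0 k ++ (L.filter (fun pa => PySem.Set.equal pa.2 k)).map (·.1) := by
  induction L generalizing idx0 with
  | nil => simp
  | cons pa rest ih =>
    simp only [List.foldl_cons, ih, pv_fsGet_fsApp, List.filter_cons]
    by_cases h : PySem.Set.equal pa.2 k = true
    · simp [h]
    · simp [h]
theorem pv_count_filter_map_fst (L : List (String × List String)) (p : String)
    (sp : List String) (hnd : (L.map Prod.fst).Nodup) (hmem : (p, sp) ∈ L)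
    (q : (String × List String) → Bool) :
    ((L.filter q).map (·.1)).count p = if q (p, sp) = true then 1 else 0 := by
  induction L with
  | nil => simp at hmem
  | cons b rest ih =>
    simp only [List.map_cons, List.nodup_cons] at hnd
    rcases List.mem_cons.mp hmem with hb | hb
    · subst hb
      have hnot : ((rest.filter q).map (·.1)).count p = 0 := by
        rw [List.count_eq_zero]
        intro hc
        rcases List.mem_map.mp hc with ⟨x, hx, hfst⟩
        have hx1 : x.1 ∈ rest.map Prod.fst :=
          List.mem_map_of_mem (f := Prod.fst) (List.mem_filter.mp hx).1
        exact hnd.1 (hfst ▸ hx1)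
      by_cases hq : q (p, sp) = true <;>
        simp [hq, hnot]
    · have hne : b.1 ≠ p := by
        intro he
        have hb1 : (p, sp).1 ∈ rest.map Prod.fst := List.mem_map_of_mem (f := Prod.fst) hb
        exact hnd.1 (he ▸ hb1)
      rw [List.filter_cons]
      by_cases hq : q b = true <;>
        simp [hq, hne, ih hnd.2 hb]

theorem pv_edge_char (p n : String) (sp sn : List String) :
    pvEdge p sp (n, sn) = true ↔
      n ≠ p ∧ n ∈ sn ∧
        (PySem.Set.equal sp (PySem.Set.ofList sn) = true ∨
         PySem.Set.equal sp (PySem.Set.diff (PySem.Set.ofList sn) [n]) = true) := by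
  simp only [pvEdge, Bool.and_eq_true, decide_eq_true_eq, PySem.Set.equal_iff,
    PySem.Set.mem_union, PySem.Set.mem_ofList, PySem.Set.mem_diff, List.mem_singleton]
  constructor
  · rintro ⟨hne, h⟩
    have hn : n ∈ sn := (h n).mpr (Or.inl rfl)
    refine ⟨hne, hn, ?_⟩
    by_cases hp : n ∈ sp
    · left
      intro x
      constructor
      · intro hx
        exact (h x).mpr (Or.inr hx)
      · intro hx
        rcases (h x).mp hx with he | hx'
        · exact he ▸ hp
        · exact hx'
    · right
      intro x
      constructor
      · intro hx
        refine ⟨(h x).mpr (Or.inr hx), ?_⟩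
        intro he
        exact hp (he ▸ hx)
      · rintro ⟨hx, hne'⟩
        rcases (h x).mp hx with he | hx'
        · exact absurd he hne'
        · exact hx'
  · rintro ⟨hne, hn, hor | hor⟩
    · refine ⟨hne, fun x => ?_⟩
      constructor
      · intro hx
        exact Or.inr ((hor x).mpr hx)
      · rintro (he | hx)
        · exact he ▸ hn
        · exact (hor x).mp hx
    · refine ⟨hne, fun x => ?_⟩
      constructor
      · intro hx
        by_cases he : x = n
        · exact Or.inl he
        · exact Or.inr ((hor x).mpr ⟨hx, he⟩)
      · rintro (he | hx)
        · exact he ▸ hn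
        · exact ((hor x).mp hx).1
theorem pv_getD_foldl_insert_nil (L : List (String × List String)) (p : String)
    (d : PySem.Dict String (List String)) (h : d.getD p [] = []) :
    (L.foldl (fun ch pa => ch.insert pa.1 ([] : List String)) d).getD p [] = [] := by
  induction L generalizing d with
  | nil => exact h
  | cons pa rest ih =>
    refine ih _ ?_
    rw [PySem.Dict.getD_insert]
    split
    · rfl
    · exact h

theorem pv_children0_getD (L : List (String × List String)) (p : String) :
    (L.foldl (fun ch pa => ch.insert pa.1 ([] : List String)) PySem.Dict.empty).getD p [] = [] := by
  exact pv_getD_foldl_insert_nil L p _ (by simp)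

theorem pv_modify_fold_getD (l : List String) (x p : String)
    (ch : PySem.Dict String (List String)) :
    (l.foldl (fun ch q => ch.modify q [] (· ++ [x])) ch).getD p [] =
      ch.getD p [] ++ List.replicate (l.count p) x := by
  induction l generalizing ch with
  | nil => simp
  | cons q rest ih =>
    rw [List.foldl_cons, ih, PySem.Dict.getD_modify, List.count_cons]
    by_cases he : p = q
    · subst he
      simp only [beq_self_eq_true, if_true]
      rw [List.append_assoc, List.singleton_append, ← List.replicate_succ]
    · simp [he, Ne.symm he]
theorem pv_count_filter (l : List String) (p : String) (q : String → Bool) :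
    (l.filter q).count p = if q p = true then l.count p else 0 := by
  induction l with
  | nil => simp
  | cons a rest ih =>
    rw [List.filter_cons]
    by_cases hq : q a = true
    · by_cases he : a = p
      · subst he; simp [hq, ih]
      · simp [hq, he, ih]
    · by_cases he : a = p
      · subst he; simp [hq, ih]
      · simp [hq, he, ih]

theorem pv_cands_count (L : List (String × List String)) (p n : String)
    (sp sn : List String) (hnd : (L.map Prod.fst).Nodup) (hmem : (p, sp) ∈ L)
    (hc : n ∈ sn) :
    ((pvFsGet (L.foldl (fun idx pa => pvFsApp idx pa.2 pa.1) []) (PySem.Set.ofList sn) ++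
       pvFsGet (L.foldl (fun idx pa => pvFsApp idx pa.2 pa.1) [])
         (PySem.Set.diff (PySem.Set.ofList sn) [n])).filter
        (fun q => q ≠ n)).count p =
      if pvEdge p sp (n, sn) = true then 1 else 0 := by
  rw [pv_count_filter, List.count_append, pv_fsGet_index, pv_fsGet_index]
  simp only [pvFsGet, List.nil_append]
  rw [pv_count_filter_map_fst L p sp hnd hmem, pv_count_filter_map_fst L p sp hnd hmem]
  by_cases hne : p ≠ n
  · rw [if_pos (by simpa using hne)]
    by_cases h1 : PySem.Set.equal sp (PySem.Set.ofList sn) = true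
    · have h2 : ¬ PySem.Set.equal sp (PySem.Set.diff (PySem.Set.ofList sn) [n]) = true := by
        intro h2
        have hx1 := ((PySem.Set.equal_iff _ _).mp h1 n).mpr (by simpa using hc)
        have hx2 := ((PySem.Set.equal_iff _ _).mp h2 n).mp hx1
        simp [PySem.Set.mem_diff] at hx2
      have he : pvEdge p sp (n, sn) = true :=
        (pv_edge_char p n sp sn).mpr ⟨fun h => hne h.symm, hc, Or.inl h1⟩
      simp [h1, h2, he]
    · by_cases h2 : PySem.Set.equal sp (PySem.Set.diff (PySem.Set.ofList sn) [n]) = true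
      · have he : pvEdge p sp (n, sn) = true :=
          (pv_edge_char p n sp sn).mpr ⟨fun h => hne h.symm, hc, Or.inr h2⟩
        simp [h1, h2, he]
      · have he : ¬ pvEdge p sp (n, sn) = true := by
          intro he
          rcases (pv_edge_char p n sp sn).mp he with ⟨_, _, h | h⟩
          · exact h1 h
          · exact h2 h
        simp [h1, h2, he]
  · rw [not_not] at hne
    subst hne
    have he : ¬ pvEdge p sp (p, sn) = true := by
      intro he
      exact ((pv_edge_char p p sp sn).mp he).1 rfl
    simp [he]

theorem pv_children_getD (L : List (String × List String)) (p : String) (sp : List String)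
    (hnd : (L.map Prod.fst).Nodup) (hmem : (p, sp) ∈ L) :
    ((L.foldl (fun ch nb =>
      if PySem.Set.contains nb.2 nb.1 = true then
        (((pvFsGet (L.foldl (fun idx pa => pvFsApp idx pa.2 pa.1) []) (PySem.Set.ofList nb.2) ++
           pvFsGet (L.foldl (fun idx pa => pvFsApp idx pa.2 pa.1) [])
             (PySem.Set.diff (PySem.Set.ofList nb.2) [nb.1])).filter
            (fun q => q ≠ nb.1)).foldl (fun ch q => ch.modify q [] (· ++ [nb.1])) ch)
      else ch)
      (L.foldl (fun ch pa => ch.insert pa.1 ([] : List String)) PySem.Dict.empty)).getD p []) =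
      (L.filter (pvEdge p sp)).map (·.1) := by
  have main : ∀ (M : List (String × List String)) (ch : PySem.Dict String (List String)),
      ((M.foldl (fun ch nb =>
        if PySem.Set.contains nb.2 nb.1 = true then
          (((pvFsGet (L.foldl (fun idx pa => pvFsApp idx pa.2 pa.1) []) (PySem.Set.ofList nb.2) ++
             pvFsGet (L.foldl (fun idx pa => pvFsApp idx pa.2 pa.1) [])
               (PySem.Set.diff (PySem.Set.ofList nb.2) [nb.1])).filter
              (fun q => q ≠ nb.1)).foldl (fun ch q => ch.modify q [] (· ++ [nb.1])) ch)
        else ch) ch).getD p []) = ch.getD p [] ++ (M.filter (pvEdge p sp)).map (·.1) := by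
    intro M
    induction M with
    | nil => simp
    | cons nb rest ih =>
      intro ch
      obtain ⟨n1, s1⟩ := nb
      rw [List.foldl_cons, List.filter_cons]
      by_cases hc : PySem.Set.contains s1 n1 = true
      · rw [if_pos hc, ih, pv_modify_fold_getD,
          pv_cands_count L p n1 sp s1 hnd hmem ((PySem.Set.contains_iff _ _).mp hc)]
        by_cases he : pvEdge p sp (n1, s1) = true
        · simp [he, List.append_assoc]
        · simp [he]
      · rw [if_neg hc, ih]
        have he : ¬ pvEdge p sp (n1, s1) = true := by
          intro he
          have := ((pv_edge_char p n1 sp s1).mp he).2.1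
          exact hc ((PySem.Set.contains_iff _ _).mpr this)
        simp [he]
  rw [main L _, pv_children0_getD]
  simp
theorem pv_insert_getD_self (t : PySem.Dict String (List String)) (p : String)
    (hc : t.contains p = true) (hnd : t.keys.Nodup) : t.insert p (t.getD p []) = t := by
  apply PySem.Dict.ext
  rw [PySem.Dict.items_insert_of_contains t (t.getD p []) hc]
  have hg : t.get? p = some (t.getD p []) := by
    rw [PySem.Dict.contains_eq_isSome_get?] at hc
    cases hgp : t.get? p with
    | none => rw [hgp] at hc; simp at hc
    | some v => rw [PySem.Dict.getD_of_get?_eq_some t [] hgp]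
  have hev : ∀ q ∈ t.items, (fun q : String × List String =>
      if q.1 == p then (p, t.getD p []) else q) q = id q := by
    intro q hq
    by_cases he : q.1 = p
    · have : t.get? q.1 = some q.2 := PySem.Dict.get?_of_mem_items t (by simpa using hq) hnd
      rw [he] at this
      rw [this] at hg
      have hv : q.2 = t.getD p [] := Option.some_injective _ hg
      simp only [he, beq_self_eq_true, if_true, id]
      rw [← hv, ← he]
    · simp [he]
  rw [List.map_congr_left hev, List.map_id]

-- the body A runs for a matching (pred, node) pair, as a function of node's name only
def pvCoreA (p : String) (st : PySem.Dict String (List String) × Bool) (n : String) :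
    PySem.Dict String (List String) × Bool :=
  let st1 := if PySem.Set.contains (st.1.getD p []) n = true then st
             else (st.1.insert p (PySem.Set.union (st.1.getD p []) [n]), true)
  if st1.1.contains n = true then st1 else (st1.1.insert n [], true)

theorem pv_stepA_eq (pa nb : String × List String)
    (st : PySem.Dict String (List String) × Bool) :
    pvStepA pa st nb = if pvEdge pa.1 pa.2 nb = true then pvCoreA pa.1 st nb.1 else st := by
  by_cases h : pvEdge pa.1 pa.2 nb = true
  · have h' : nb.1 ≠ pa.1 ∧ PySem.Set.equal nb.2 (PySem.Set.union [nb.1] pa.2) = true := by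
      simpa [pvEdge] using h
    rw [if_pos h, pvStepA, if_pos h', pvCoreA]
  · have h' : ¬ (nb.1 ≠ pa.1 ∧ PySem.Set.equal nb.2 (PySem.Set.union [nb.1] pa.2) = true) := by
      simpa [pvEdge] using h
    rw [if_neg h, pvStepA, if_neg h']

theorem pv_foldl_filter_map {α β σ : Type} (L : List α) (q : α → Bool) (g : α → β)
    (f : σ → β → σ) (st : σ) :
    L.foldl (fun st x => if q x = true then f st (g x) else st) st =
      ((L.filter q).map g).foldl f st := by
  induction L generalizing st with
  | nil => rfl
  | cons a rest ih =>
    rw [List.foldl_cons, List.filter_cons]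
    by_cases hq : q a = true
    · simp [hq, ih]
    · simp [hq, ih]
theorem pv_innerB_facts (p n : String) (t : PySem.Dict String (List String))
    (hp : p ∈ t.keys) (hnd : t.keys.Nodup) (hne : n ≠ p) :
    (pvInnerB p t n).getD p [] = PySem.Set.add (t.getD p []) n ∧
    (∀ q, q ≠ p → (pvInnerB p t n).getD q [] = t.getD q []) ∧
    (∀ x, x ∈ (pvInnerB p t n).keys ↔ x ∈ t.keys ∨ x = n) ∧
    (pvInnerB p t n).keys.Nodup := by
  have hcp : t.contains p = true := (PySem.Dict.contains_iff_mem_keys t p).mpr hp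
  rw [pvInnerB]
  set t1 := t.insert p (PySem.Set.add (t.getD p []) n) with ht1
  have hk1 : t1.keys = t.keys := PySem.Dict.keys_insert_of_contains t _ hcp
  have hnd1 : t1.keys.Nodup := by rw [hk1]; exact hnd
  have hg1p : t1.getD p [] = PySem.Set.add (t.getD p []) n := by
    rw [ht1, PySem.Dict.getD_insert]; simp
  have hg1q : ∀ q, q ≠ p → t1.getD q [] = t.getD q [] := by
    intro q hq
    rw [ht1, PySem.Dict.getD_insert, if_neg hq]
  by_cases hc : t1.contains n = true
  · rw [if_pos hc]
    refine ⟨hg1p, hg1q, ?_, hnd1⟩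
    intro x
    rw [hk1]
    have hn : n ∈ t.keys := by
      rw [← hk1]
      exact (PySem.Dict.contains_iff_mem_keys t1 n).mp hc
    constructor
    · exact Or.inl
    · rintro (h | h)
      · exact h
      · exact h ▸ hn
  · rw [if_neg hc]
    have hc' : t1.contains n = false := by simpa using hc
    have hk2 : (t1.insert n []).keys = t1.keys ++ [n] :=
      PySem.Dict.keys_insert_of_not_contains t1 _ hc'
    refine ⟨?_, ?_, ?_, ?_⟩
    · rw [PySem.Dict.getD_insert, if_neg (Ne.symm hne), hg1p]
    · intro q hq
      by_cases hqn : q = n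
      · subst hqn
        rw [PySem.Dict.getD_insert, if_pos rfl]
        have : t.contains q = false := by
          rw [ht1] at hc'
          rw [PySem.Dict.contains_insert] at hc'
          simp only [Bool.or_eq_false_iff] at hc'
          exact hc'.2
        rw [PySem.Dict.getD_of_not_contains t [] this]
      · rw [PySem.Dict.getD_insert, if_neg hqn, hg1q q hq]
    · intro x
      rw [hk2, hk1, List.mem_append, List.mem_singleton]
    · rw [hk2, hk1]
      have hn : n ∉ t.keys := by
        intro h
        rw [ht1] at hc'
        rw [PySem.Dict.contains_insert] at hc'
        simp only [Bool.or_eq_false_iff] at hc'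
        exact absurd ((PySem.Dict.contains_iff_mem_keys t n).mpr h) (by simp [hc'.2])
      rw [List.nodup_append]
      refine ⟨hnd, List.nodup_singleton n, ?_⟩
      intro a ha b hb
      rw [List.mem_singleton] at hb
      exact fun he => hn ((hb ▸ he) ▸ ha)

theorem pv_coreA_innerB (p n : String) (t : PySem.Dict String (List String)) (c : Bool)
    (hp : p ∈ t.keys) (hnd : t.keys.Nodup) :
    (pvCoreA p (t, c) n).1 = pvInnerB p t n := by
  have hcp : t.contains p = true := (PySem.Dict.contains_iff_mem_keys t p).mpr hp
  rw [pvCoreA, pvInnerB]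
  by_cases hm : PySem.Set.contains (t.getD p []) n = true
  · have hadd : PySem.Set.add (t.getD p []) n = t.getD p [] :=
      PySem.Set.add_of_mem ((PySem.Set.contains_iff _ _).mp hm)
    have hins : t.insert p (PySem.Set.add (t.getD p []) n) = t := by
      rw [hadd]; exact pv_insert_getD_self t p hcp hnd
    rw [if_pos hm, hins]
    by_cases hc : t.contains n = true <;> simp [hc]
  · have hu : PySem.Set.union (t.getD p []) [n] = PySem.Set.add (t.getD p []) n := rfl
    rw [if_neg hm, hu]
    by_cases hc : (t.insert p (PySem.Set.add (t.getD p []) n)).contains n = true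
    · rw [if_pos hc, if_pos hc]
    · rw [if_neg hc, if_neg hc]

theorem pv_inner_fold (p : String) (CH : List String) (hnp : p ∉ CH) :
    ∀ (t : PySem.Dict String (List String)) (c : Bool), p ∈ t.keys → t.keys.Nodup →
      ((CH.foldl (pvCoreA p) (t, c)).1 = CH.foldl (pvInnerB p) t) ∧
      (∀ q, q ≠ p → (CH.foldl (pvInnerB p) t).getD q [] = t.getD q []) ∧
      (∀ v, v ∈ (CH.foldl (pvInnerB p) t).getD p [] ↔ v ∈ t.getD p [] ∨ v ∈ CH) ∧
      (∀ x, x ∈ (CH.foldl (pvInnerB p) t).keys ↔ x ∈ t.keys ∨ x ∈ CH) ∧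
      (CH.foldl (pvInnerB p) t).keys.Nodup := by
  induction CH with
  | nil =>
    intro t c hp hnd
    exact ⟨rfl, fun _ _ => rfl, by simp, by simp, hnd⟩
  | cons n rest ih =>
    intro t c hp hnd
    have hne : n ≠ p := fun h => hnp (h ▸ List.mem_cons_self ..)
    have hnp' : p ∉ rest := fun h => hnp (List.mem_cons_of_mem _ h)
    obtain ⟨hf1, hf2, hf3, hf4⟩ := pv_innerB_facts p n t hp hnd hne
    have hp' : p ∈ (pvInnerB p t n).keys := (hf3 p).mpr (Or.inl hp)
    obtain ⟨ih1, ih2, ih3, ih4, ih5⟩ :=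
      ih hnp' (pvInnerB p t n) (pvCoreA p (t, c) n).2 hp' hf4
    refine ⟨?_, ?_, ?_, ?_, ih5⟩
    · rw [List.foldl_cons, List.foldl_cons,
        show pvCoreA p (t, c) n = ((pvCoreA p (t, c) n).1, (pvCoreA p (t, c) n).2) from rfl,
        pv_coreA_innerB p n t c hp hnd]
      exact ih1
    · intro q hq
      rw [List.foldl_cons, ih2 q hq, hf2 q hq]
    · intro v
      rw [List.foldl_cons, ih3, hf1]
      simp only [PySem.Set.mem_add, List.mem_cons]
      tauto
    · intro x
      rw [List.foldl_cons, ih4, hf3]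
      simp only [List.mem_cons]
      tauto
-- proof-side name for the children dict port B builds
def pvChildren (L : List (String × List String)) : PySem.Dict String (List String) :=
  L.foldl (fun ch nb =>
      if PySem.Set.contains nb.2 nb.1 = true then
        (((pvFsGet (L.foldl (fun idx pa => pvFsApp idx pa.2 pa.1) []) (PySem.Set.ofList nb.2) ++
           pvFsGet (L.foldl (fun idx pa => pvFsApp idx pa.2 pa.1) [])
             (PySem.Set.diff (PySem.Set.ofList nb.2) [nb.1])).filter
            (fun p => p ≠ nb.1)).foldl (fun ch p => ch.modify p [] (· ++ [nb.1])) ch)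
      else ch)
    (L.foldl (fun ch pa => ch.insert pa.1 ([] : List String)) PySem.Dict.empty)

theorem pv_children_spec (L : List (String × List String)) (p : String) (sp : List String)
    (hnd : (L.map Prod.fst).Nodup) (hmem : (p, sp) ∈ L) :
    (pvChildren L).getD p [] = (L.filter (pvEdge p sp)).map (·.1) := by
  rw [pvChildren]
  exact pv_children_getD L p sp hnd hmem

theorem pv_p_notin_ch (L : List (String × List String)) (p : String) (sp : List String) :
    p ∉ (L.filter (pvEdge p sp)).map (·.1) := by
  intro h
  rcases List.mem_map.mp h with ⟨nb, hnb, hfst⟩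
  have := (List.mem_filter.mp hnb).2
  rw [pvEdge, Bool.and_eq_true, decide_eq_true_eq] at this
  exact this.1 hfst

theorem pv_sweep_false (L : List (String × List String))
    (S : List (String × List String)) (acc : List String) :
    (S.foldl (pvSweepF L) (acc, false)).2 = false := by
  induction S generalizing acc with
  | nil => rfl
  | cons pa rest ih =>
    rw [List.foldl_cons, pvSweepF]
    by_cases hc : PySem.Set.contains acc pa.1 = true
    · simp only [if_pos hc]; exact ih _
    · simp only [if_neg hc, Bool.false_and]; exact ih _

theorem pv_innerA_filtered (L : List (String × List String)) (pa : String × List String)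
    (st : PySem.Dict String (List String) × Bool) :
    L.foldl (pvStepA pa) st =
      ((L.filter (pvEdge pa.1 pa.2)).map (·.1)).foldl (pvCoreA pa.1) st := by
  rw [← pv_foldl_filter_map]
  exact PySem.List.foldl_congr_mem L _ _ st (fun st nb _ => pv_stepA_eq pa nb st)

theorem pv_main (L : List (String × List String)) (hnd : (L.map Prod.fst).Nodup) :
    ∀ (S : List (String × List String)), (∀ pa ∈ S, pa ∈ L) →
    ∀ (t : PySem.Dict String (List String)) (acc : List String) (c : Bool),
      (∀ x, x ∈ t.keys ↔ x ∈ acc) → t.keys.Nodup →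
      (S.foldl (pvSweepF L) (acc, true)).2 = true →
      ((S.foldl (fun st pa => L.foldl (pvStepA pa) st) (t, c)).1
          = S.foldl (pvStepB (pvChildren L)) t) ∧
      (∀ x, x ∈ (S.foldl (pvStepB (pvChildren L)) t).keys ↔
          x ∈ (S.foldl (pvSweepF L) (acc, true)).1) ∧
      (S.foldl (pvStepB (pvChildren L)) t).keys.Nodup ∧
      (∀ q v, v ∈ t.getD q [] → v ∈ (S.foldl (pvStepB (pvChildren L)) t).getD q []) ∧
      (∀ x, x ∈ t.keys → x ∈ (S.foldl (pvStepB (pvChildren L)) t).keys) ∧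
      (∀ (p : String) (sp : List String), (p, sp) ∈ S → ∀ nb ∈ L, pvEdge p sp nb = true →
         nb.1 ∈ (S.foldl (pvStepB (pvChildren L)) t).getD p [] ∧
         nb.1 ∈ (S.foldl (pvStepB (pvChildren L)) t).keys) := by
  intro S
  induction S with
  | nil =>
    intro _ t acc c hR hndt _
    exact ⟨rfl, fun x => hR x, hndt, fun _ _ h => h, fun _ h => h, fun _ _ h => absurd h (by simp)⟩
  | cons pa S' ih =>
    intro hS t acc c hR hndt hok
    obtain ⟨p, sp⟩ := pa
    have hmemL : (p, sp) ∈ L := hS _ (List.mem_cons_self ..)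
    have hS' : ∀ pa ∈ S', pa ∈ L := fun pa h => hS pa (List.mem_cons_of_mem _ h)
    have hch : (pvChildren L).getD p [] = (L.filter (pvEdge p sp)).map (·.1) :=
      pv_children_spec L p sp hnd hmemL
    set CH := (L.filter (pvEdge p sp)).map (·.1) with hCH
    rw [List.foldl_cons, List.foldl_cons, List.foldl_cons] at *
    by_cases hcac : PySem.Set.contains acc p = true
    · -- pred already in the tree: both sides run the inner loop over CH
      have hpt : p ∈ t.keys := (hR p).mpr ((PySem.Set.contains_iff _ _).mp hcac)
      have hct : t.contains p = true := (PySem.Dict.contains_iff_mem_keys t p).mpr hpt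
      have hsw : pvSweepF L (acc, true) (p, sp) = (PySem.Set.update acc CH, true) := by
        rw [pvSweepF]; simp only [if_pos hcac]; rw [hCH]
      have hBstep : pvStepB (pvChildren L) t (p, sp) = CH.foldl (pvInnerB p) t := by
        rw [pvStepB]; simp only [if_pos hct, hch]
      obtain ⟨hi1, hi2, hi3, hi4, hi5⟩ :=
        pv_inner_fold p CH (pv_p_notin_ch L p sp) t c hpt hndt
      have hR' : ∀ x, x ∈ (CH.foldl (pvInnerB p) t).keys ↔ x ∈ PySem.Set.update acc CH := by
        intro x
        rw [hi4 x, PySem.Set.mem_update]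
        exact or_congr (hR x) Iff.rfl
      have hok' : (S'.foldl (pvSweepF L) (PySem.Set.update acc CH, true)).2 = true := by
        rw [hsw] at hok; exact hok
      obtain ⟨hm1, hm2, hm3, hm4, hm5, hm6⟩ :=
        ih hS' (CH.foldl (pvInnerB p) t) (PySem.Set.update acc CH)
          (CH.foldl (pvCoreA p) (t, c)).2 hR' hi5 hok'
      refine ⟨?_, ?_, ?_, ?_, ?_, ?_⟩
      · rw [pv_innerA_filtered, ← hCH, hBstep,
          show CH.foldl (pvCoreA p) (t, c) =
            ((CH.foldl (pvCoreA p) (t, c)).1, (CH.foldl (pvCoreA p) (t, c)).2) from rfl,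
          hi1]
        exact hm1
      · rw [hBstep, hsw]; exact hm2
      · rw [hBstep]; exact hm3
      · intro q v hv
        rw [hBstep]
        apply hm4
        by_cases hq : q = p
        · subst hq; exact (hi3 v).mpr (Or.inl hv)
        · rw [hi2 q hq]; exact hv
      · intro x hx
        rw [hBstep]
        exact hm5 _ ((hi4 x).mpr (Or.inl hx))
      · intro p' sp' hp' nb hnb he
        rcases List.mem_cons.mp hp' with hh | hh
        · have he1 : p' = p := congrArg Prod.fst hh
          have he2 : sp' = sp := congrArg Prod.snd hh
          have he' : pvEdge p sp nb = true := by rw [← he1, ← he2]; exact he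
          have hin : nb.1 ∈ CH := by
            rw [hCH]
            exact List.mem_map_of_mem (f := (·.1)) (List.mem_filter.mpr ⟨hnb, he'⟩)
          rw [he1]
          constructor
          · rw [hBstep]
            exact hm4 _ _ ((hi3 nb.1).mpr (Or.inr hin))
          · rw [hBstep]
            exact hm5 _ ((hi4 nb.1).mpr (Or.inr hin))
        · rw [hBstep]
          exact hm6 p' sp' hh nb hnb he
    · -- pred not yet keyed: the sweep flag forces CH = [], both sides skip
      have hsw : pvSweepF L (acc, true) (p, sp) =
          (acc, (L.filter (pvEdge p sp)).isEmpty) := by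
        rw [pvSweepF]; simp only [if_neg hcac, Bool.true_and]
      have hemp : (L.filter (pvEdge p sp)).isEmpty = true := by
        by_contra hne
        have : (S'.foldl (pvSweepF L) (acc, false)).2 = false := pv_sweep_false L S' acc
        rw [hsw] at hok
        rw [Bool.not_eq_true] at hne
        rw [hne] at hok
        rw [this] at hok
        exact Bool.false_ne_true hok
      have hCHnil : CH = [] := by
        rw [hCH, List.isEmpty_iff.mp hemp]; rfl
      have hctf : ¬ t.contains p = true := by
        intro hct
        exact hcac ((PySem.Set.contains_iff _ _).mpr
          ((hR p).mp ((PySem.Dict.contains_iff_mem_keys t p).mp hct)))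
      have hBstep : pvStepB (pvChildren L) t (p, sp) = t := by
        rw [pvStepB]; simp only [if_neg hctf]
      have hAstep : L.foldl (pvStepA (p, sp)) (t, c) = (t, c) := by
        rw [pv_innerA_filtered]
        simp only [← hCH, hCHnil, List.foldl_nil]
      have hok' : (S'.foldl (pvSweepF L) (acc, true)).2 = true := by
        rw [hsw, hemp] at hok; exact hok
      obtain ⟨hm1, hm2, hm3, hm4, hm5, hm6⟩ := ih hS' t acc c hR hndt hok'
      refine ⟨?_, ?_, ?_, ?_, ?_, ?_⟩
      · rw [hAstep, hBstep]; exact hm1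
      · rw [hBstep, hsw, hemp]; exact hm2
      · rw [hBstep]; exact hm3
      · intro q v hv; rw [hBstep]; exact hm4 q v hv
      · intro x hx; rw [hBstep]; exact hm5 x hx
      · intro p' sp' hp' nb hnb he
        rcases List.mem_cons.mp hp' with hh | hh
        · have he1 : p' = p := congrArg Prod.fst hh
          have he2 : sp' = sp := congrArg Prod.snd hh
          have he' : pvEdge p sp nb = true := by rw [← he1, ← he2]; exact he
          exfalso
          have : nb ∈ L.filter (pvEdge p sp) := List.mem_filter.mpr ⟨hnb, he'⟩
          rw [List.isEmpty_iff.mp hemp] at this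
          exact absurd this (by simp)
        · rw [hBstep]; exact hm6 p' sp' hh nb hnb he
theorem pv_innerA_id (p : String) (CH : List String)
    (t : PySem.Dict String (List String))
    (hall : ∀ n ∈ CH, PySem.Set.contains (t.getD p []) n = true ∧ t.contains n = true) :
    CH.foldl (pvCoreA p) (t, false) = (t, false) := by
  induction CH with
  | nil => rfl
  | cons n rest ih =>
    have hn := hall n (List.mem_cons_self ..)
    have hstep : pvCoreA p (t, false) n = (t, false) := by
      rw [pvCoreA]
      simp only [if_pos hn.1, if_pos hn.2]
    rw [List.foldl_cons, hstep]
    exact ih (fun n h => hall n (List.mem_cons_of_mem _ h))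

theorem pv_pass_done (L : List (String × List String))
    (t : PySem.Dict String (List String))
    (hD : ∀ pa ∈ L, ∀ nb ∈ L, pvEdge pa.1 pa.2 nb = true →
      PySem.Set.contains (t.getD pa.1 []) nb.1 = true ∧ t.contains nb.1 = true) :
    pvPassA L t = (t, false) := by
  rw [pvPassA]
  have main : ∀ S : List (String × List String), (∀ pa ∈ S, pa ∈ L) →
      S.foldl (fun st pa => L.foldl (pvStepA pa) st) (t, false) = (t, false) := by
    intro S
    induction S with
    | nil => intro _; rfl
    | cons pa S' ih =>
      intro hS
      have hpa : pa ∈ L := hS _ (List.mem_cons_self ..)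
      have hstep : L.foldl (pvStepA pa) (t, false) = (t, false) := by
        rw [pv_innerA_filtered]
        apply pv_innerA_id
        intro n hn
        rcases List.mem_map.mp hn with ⟨nb, hnb, hfst⟩
        have hf := List.mem_filter.mp hnb
        have := hD pa hpa nb hf.1 hf.2
        rw [hfst] at this
        exact this
      rw [List.foldl_cons, hstep]
      exact ih (fun pa h => hS pa (List.mem_cons_of_mem _ h))
  exact main L (fun _ h => h)

theorem pv_loop_tail (L : List (String × List String))
    (tB : PySem.Dict String (List String)) (m : Nat)
    (h2 : pvPassA L tB = (tB, false)) (hm : 1 ≤ m) : pvLoopA L m tB = tB := by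
  match m, hm with
  | k + 1, _ =>
    rw [pvLoopA, h2]
    simp

theorem pv_loop_eq (L : List (String × List String))
    (t tB : PySem.Dict String (List String)) (fuel : Nat) (hf1 : 1 ≤ fuel)
    (hc2 : (pvPassA L t).2 = true → 2 ≤ fuel)
    (h1 : (pvPassA L t).1 = tB) (h2 : pvPassA L tB = (tB, false)) :
    pvLoopA L fuel t = tB := by
  match fuel, hf1 with
  | m + 1, _ =>
    rw [pvLoopA]
    by_cases hc : (pvPassA L t).2 = true
    · have h2m : 2 ≤ m + 1 := hc2 hc
      simp only [hc, if_true, h1]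
      exact pv_loop_tail L tB m h2 (by omega)
    · simp only [Bool.not_eq_true] at hc
      simp only [hc, Bool.false_eq_true, if_false, h1]

theorem pv_roots_facts (L : List (String × List String)) :
    ∀ (d : PySem.Dict String (List String)) (r : List String),
      (∀ x, x ∈ d.keys ↔ x ∈ r) → d.keys.Nodup →
      (∀ x, x ∈ (L.foldl (fun tr nb =>
          if PySem.Set.equal nb.2 [nb.1] = true then tr.insert nb.1 [] else tr) d).keys ↔
        x ∈ (L.foldl (fun r nb =>
          if PySem.Set.equal nb.2 [nb.1] = true then PySem.Set.add r nb.1 else r) r)) ∧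
      (L.foldl (fun tr nb =>
          if PySem.Set.equal nb.2 [nb.1] = true then tr.insert nb.1 [] else tr) d).keys.Nodup := by
  induction L with
  | nil => intro d r hR hnd; exact ⟨hR, hnd⟩
  | cons nb rest ih =>
    intro d r hR hnd
    rw [List.foldl_cons, List.foldl_cons]
    by_cases hc : PySem.Set.equal nb.2 [nb.1] = true
    · simp only [if_pos hc]
      apply ih
      · intro x
        rw [PySem.Dict.mem_keys_insert, PySem.Set.mem_add]
        exact (or_congr Iff.rfl (hR x)).trans or_comm
      · exact PySem.Dict.nodup_keys_insert d nb.1 [] hnd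
    · simp only [if_neg hc]
      exact ih d r hR hnd
-- ===== VERDICT (by name: the statement is the Claim_ definition above) =====
theorem dominance_tree_spec : Claim_equal_dominance_tree := by
  intro dom _ hPre
  show dominance_tree dom = dominance_tree_alt dom
  have hnd : ((PySem.Dict.ofList dom).items.map Prod.fst).Nodup :=
    PySem.Dict.nodup_keys_ofList dom
  obtain ⟨hRmem, hRnodup⟩ :=
    pv_roots_facts (PySem.Dict.ofList dom).items PySem.Dict.empty [] (by simp) (by simp)
  obtain ⟨hm1, hm2, hm3, hm4, hm5, hm6⟩ :=
    pv_main (PySem.Dict.ofList dom).items hnd (PySem.Dict.ofList dom).items (fun _ h => h)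
      ((PySem.Dict.ofList dom).items.foldl (fun tr nb =>
        if PySem.Set.equal nb.2 [nb.1] = true then tr.insert nb.1 [] else tr) PySem.Dict.empty)
      (pvRoots (PySem.Dict.ofList dom).items) false hRmem hRnodup hPre
  have hDone : ∀ pa ∈ (PySem.Dict.ofList dom).items, ∀ nb ∈ (PySem.Dict.ofList dom).items,
      pvEdge pa.1 pa.2 nb = true →
      PySem.Set.contains
        (((PySem.Dict.ofList dom).items.foldl
            (pvStepB (pvChildren (PySem.Dict.ofList dom).items))
            ((PySem.Dict.ofList dom).items.foldl (fun tr nb =>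
              if PySem.Set.equal nb.2 [nb.1] = true then tr.insert nb.1 [] else tr)
              PySem.Dict.empty)).getD pa.1 []) nb.1 = true ∧
      ((PySem.Dict.ofList dom).items.foldl
          (pvStepB (pvChildren (PySem.Dict.ofList dom).items))
          ((PySem.Dict.ofList dom).items.foldl (fun tr nb =>
            if PySem.Set.equal nb.2 [nb.1] = true then tr.insert nb.1 [] else tr)
            PySem.Dict.empty)).contains nb.1 = true := by
    intro pa hpa nb hnb he
    have hres := hm6 pa.1 pa.2 (by simpa using hpa) nb hnb he
    exact ⟨(PySem.Set.contains_iff _ _).mpr hres.1,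
      (PySem.Dict.contains_iff_mem_keys _ _).mpr hres.2⟩
  have hpass2 := pv_pass_done (PySem.Dict.ofList dom).items _ hDone
  have hloop := pv_loop_eq (PySem.Dict.ofList dom).items
    ((PySem.Dict.ofList dom).items.foldl (fun tr nb =>
      if PySem.Set.equal nb.2 [nb.1] = true then tr.insert nb.1 [] else tr) PySem.Dict.empty)
    ((PySem.Dict.ofList dom).items.foldl
      (pvStepB (pvChildren (PySem.Dict.ofList dom).items))
      ((PySem.Dict.ofList dom).items.foldl (fun tr nb =>
        if PySem.Set.equal nb.2 [nb.1] = true then tr.insert nb.1 [] else tr)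
        PySem.Dict.empty))
    ((PySem.Dict.ofList dom).items.length * (PySem.Dict.ofList dom).items.length +
      (PySem.Dict.ofList dom).items.length + 1)
    (by omega)
    (by
      intro hch
      have hne : (PySem.Dict.ofList dom).items ≠ [] := by
        intro hnil
        rw [hnil] at hch
        exact Bool.false_ne_true hch
      have hl : 1 ≤ (PySem.Dict.ofList dom).items.length :=
        List.length_pos_iff.mpr hne
      have := Nat.le_mul_of_pos_left (PySem.Dict.ofList dom).items.length
        (show 0 < (PySem.Dict.ofList dom).items.length from hl)
      omega)
    hm1 hpass2
  show (pvLoopA (PySem.Dict.ofList dom).items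
      ((PySem.Dict.ofList dom).items.length * (PySem.Dict.ofList dom).items.length +
        (PySem.Dict.ofList dom).items.length + 1)
      ((PySem.Dict.ofList dom).items.foldl (fun tr nb =>
        if PySem.Set.equal nb.2 [nb.1] = true then tr.insert nb.1 [] else tr)
        PySem.Dict.empty)).items = _
  rw [hloop]
  rfl
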